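-- pv_equiv track=rewrite | github.com/vv-aa-ss/printinstaller | main.py | is_printer
-- ===== SOURCE A (Python) =====
-- from typing import Dict, List, Optional, Tuple
--
-- PRINTER_KEYWORDS = (
--     "printer", "ipp", "lpd", "lp", "kyocera", "taskalfa", "ecosys", "km-mfp",
--     "hp", "hewlett", "brother", "canon", "ricoh", "lexmark", "epson", "xerox",
--     "toshiba", "sharp", "sindoh", "konica", "minolta", "oki", "samsung"
-- )
--
-- def is_printer(ports_open: Dict[int, bool], hints: List[str]) -> bool:
--     if ports_open.get(9100) or ports_open.get(631) or ports_open.get(515):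
--         return True
--     for h in hints:
--         low = (h or "").lower()
--         if any(k in low for k in PRINTER_KEYWORDS):
--             return True
--     return False
-- ===== SOURCE B (Python) =====
-- PRINTER_KEYWORDS = (
--     "printer", "ipp", "lpd", "lp", "kyocera", "taskalfa", "ecosys", "km-mfp",
--     "hp", "hewlett", "brother", "canon", "ricoh", "lexmark", "epson", "xerox",
--     "toshiba", "sharp", "sindoh", "konica", "minolta", "oki", "samsung"
-- )
--
-- PRINTER_PORTS = (9100, 631, 515)
--
--
-- def _build_trie():
--     # prefix tree of all keywords: nested dicts, terminal marked by key None
--     root = {}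
--     for k in PRINTER_KEYWORDS:
--         node = root
--         for c in k:
--             node = node.setdefault(c, {})
--         node[None] = True
--     return root
--
--
-- _TRIE = _build_trie()
--
--
-- def _walk(node, s, i):
--     # True iff some stored keyword is a prefix of s[i:]
--     j = i
--     while True:
--         if None in node:
--             return True
--         if j == len(s):
--             return False
--         node = node.get(s[j])
--         if node is None:
--             return False
--         j += 1
--
--
-- def _scan(low):
--     # True iff some keyword occurs in low: walk the trie from every start position
--     i = 0
--     while True:
--         if _walk(_TRIE, low, i):
--             return True
--         if i == len(low):
--             return False
--         i += 1
--
--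
-- def is_printer(ports_open, hints):
--     if any(ports_open.get(p) for p in PRINTER_PORTS):
--         return True
--     return any(_scan((h or "").lower()) for h in hints)
-- ===== Notes on version B (the rewrite author's own statement) =====
-- stated objective: alternative
-- what changed: The per-hint keyword-major loop with the builtin substring test is replaced by a prefix tree (trie) of all keywords built once at module level: each lowered hint is scanned position by position, walking the trie along the suffix, so the inner iteration over the keyword tuple and the builtin substring search disappear.
import Mathlib
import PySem

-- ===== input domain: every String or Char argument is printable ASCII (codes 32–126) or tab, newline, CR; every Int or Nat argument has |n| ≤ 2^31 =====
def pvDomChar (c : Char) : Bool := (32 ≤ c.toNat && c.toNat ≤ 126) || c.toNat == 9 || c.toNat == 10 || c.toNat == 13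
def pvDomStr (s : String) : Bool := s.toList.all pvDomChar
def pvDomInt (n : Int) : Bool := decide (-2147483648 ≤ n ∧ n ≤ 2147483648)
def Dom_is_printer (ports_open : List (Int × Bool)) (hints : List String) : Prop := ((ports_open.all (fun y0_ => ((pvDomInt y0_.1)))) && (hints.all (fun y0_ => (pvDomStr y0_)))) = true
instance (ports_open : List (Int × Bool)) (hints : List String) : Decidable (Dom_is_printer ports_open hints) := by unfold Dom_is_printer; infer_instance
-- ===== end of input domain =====

-- B replaces A's per-hint keyword-major substring loop by a prefix tree (trie) of all
-- keywords built once; each lowered hint is scanned position by position walking the trie.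
-- Objective: alternative (not measured faster).

def printerKeywords : List String :=
  ["printer", "ipp", "lpd", "lp", "kyocera", "taskalfa", "ecosys", "km-mfp",
   "hp", "hewlett", "brother", "canon", "ricoh", "lexmark", "epson", "xerox",
   "toshiba", "sharp", "sindoh", "konica", "minolta", "oki", "samsung"]

-- ===== PORT A =====
-- `(h or "")` is `h` for every string; the `or`-chain guard is used only as a condition, so it is
-- the disjunction of the three truthy lookups (`.get(p)` truthy iff the stored value is True).
def is_printer (ports_open : List (Int × Bool)) (hints : List String) : Bool :=
  if (PySem.Dict.mk ports_open).getD (9100 : Int) false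
      || (PySem.Dict.mk ports_open).getD (631 : Int) false
      || (PySem.Dict.mk ports_open).getD (515 : Int) false then
    true
  else
    hints.any (fun h =>
      printerKeywords.any (fun k => PySem.Str.isIn k (PySem.Str.lower h)))

-- ===== PORT B =====
-- trie node: terminal flag + children (mutual pair instead of a nested inductive)
mutual
inductive PTrie where
  | node : Bool → PKids → PTrie
inductive PKids where
  | nil : PKids
  | cons : Char → PTrie → PKids → PKids
end

-- child lookup (`node.get(c)` in Source B)
def PKids.find : PKids → Char → Option PTrie
  | .nil, _ => none
  | .cons d t ks, c => if d = c then some t else ks.find c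

-- child update: the write-back of the mutation `node.setdefault(c, {})` performs in Source B
def PKids.set : PKids → Char → PTrie → PKids
  | .nil, c, t => .cons c t .nil
  | .cons d t' ks, c, t => if d = c then .cons d t ks else .cons d t' (ks.set c t)

-- insert one keyword (the inner loop of `_build_trie`, descending via setdefault)
def PTrie.insert : PTrie → List Char → PTrie
  | .node _ ks, [] => .node true ks
  | .node b ks, c :: rest =>
      .node b (ks.set c (((ks.find c).getD (.node false .nil)).insert rest))

-- `_build_trie()`
def buildTrie : PTrie :=
  printerKeywords.foldl (fun t k => t.insert k.toList) (.node false .nil)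

-- `_walk`: True iff some stored keyword is a prefix of the given suffix
def PTrie.walk : PTrie → List Char → Bool
  | .node true _, _ => true
  | .node false _, [] => false
  | .node false ks, c :: rest =>
      match ks.find c with
      | some t => t.walk rest
      | none => false
termination_by _t cs => cs.length

-- `_scan`: walk the trie from every start position of the lowered hint
def scanTrie : List Char → Bool
  | [] => buildTrie.walk []
  | c :: rest => buildTrie.walk (c :: rest) || scanTrie rest

def is_printer_alt (ports_open : List (Int × Bool)) (hints : List String) : Bool :=
  if [(9100 : Int), 631, 515].any (fun p => (PySem.Dict.mk ports_open).getD p false) then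
    true
  else
    hints.any (fun h => scanTrie (PySem.Str.lower h).toList)

-- ===== PRECONDITION & SPEC =====
def Spec_is_printer (ports_open : List (Int × Bool)) (hints : List String) (out : Bool) : Prop := out = is_printer_alt ports_open hints
instance (ports_open : List (Int × Bool)) (hints : List String) (out : Bool) : Decidable (Spec_is_printer ports_open hints out) := by unfold Spec_is_printer; infer_instance

-- ===== CLAIM (what is proved, stated in full; the proofs are below) =====
def Claim_equal_is_printer : Prop := ∀ (ports_open : List (Int × Bool)) (hints : List String), Dom_is_printer ports_open hints → Spec_is_printer ports_open hints (is_printer ports_open hints)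

-- ===== LEMMAS AND PROOFS =====

lemma find_set : ∀ (ks : PKids) (c : Char) (t : PTrie) (d : Char),
    (ks.set c t).find d = if d = c then some t else ks.find d
  | .nil, c, t, d => by
      by_cases h : d = c
      · subst h; simp [PKids.set, PKids.find]
      · simp [PKids.set, PKids.find, h, Ne.symm h]
  | .cons e t' ks, c, t, d => by
      by_cases hec : e = c
      · subst hec
        by_cases hed : e = d
        · subst hed; simp [PKids.set, PKids.find]
        · simp [PKids.set, PKids.find, hed, Ne.symm hed]
      · by_cases hed : e = d
        · subst hed
          simp [PKids.set, PKids.find, hec]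
        · simp [PKids.set, PKids.find, hec, hed, find_set ks c t d]

lemma walk_emptyNode (cs : List Char) : PTrie.walk (.node false .nil) cs = false := by
  cases cs <;> simp [PTrie.walk, PKids.find]

lemma walk_insert (w : List Char) : ∀ (t : PTrie) (cs : List Char),
    (t.insert w).walk cs = (t.walk cs || decide (w <+: cs)) := by
  induction w with
  | nil =>
      intro t cs
      obtain ⟨b, ks⟩ := t
      simp [PTrie.insert, PTrie.walk]
  | cons c rest ih =>
      intro t cs
      obtain ⟨b, ks⟩ := t
      cases b with
      | true => cases cs <;> simp [PTrie.insert, PTrie.walk]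
      | false =>
          cases cs with
          | nil => simp [PTrie.insert, PTrie.walk]
          | cons d cs' =>
              simp only [PTrie.insert, PTrie.walk, find_set]
              by_cases hdc : d = c
              · subst hdc
                rw [if_pos rfl]
                cases ks.find d with
                | none => simp [ih, walk_emptyNode, List.cons_prefix_cons]
                | some t0 => simp [ih, List.cons_prefix_cons]
              · rw [if_neg hdc]
                have hpf : decide (c :: rest <+: d :: cs') = false := by
                  simp only [decide_eq_false_iff_not, List.cons_prefix_cons, not_and]
                  intro h; exact absurd h.symm hdc
                rw [hpf, Bool.or_false]

lemma walk_foldl (l : List String) : ∀ (t : PTrie) (cs : List Char),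
    (l.foldl (fun t k => t.insert k.toList) t).walk cs
      = (t.walk cs || l.any (fun k => decide (k.toList <+: cs))) := by
  induction l with
  | nil => intro t cs; simp
  | cons k l ih =>
      intro t cs
      simp [List.foldl_cons, ih, walk_insert, Bool.or_assoc]

lemma walk_buildTrie (cs : List Char) :
    buildTrie.walk cs = printerKeywords.any (fun k => decide (k.toList <+: cs)) := by
  rw [buildTrie, walk_foldl, walk_emptyNode, Bool.false_or]

lemma scanTrie_iff (cs : List Char) :
    scanTrie cs = true ↔ ∃ j, buildTrie.walk (cs.drop j) = true := by
  induction cs with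
  | nil =>
      simp only [scanTrie]
      constructor
      · intro h; exact ⟨0, h⟩
      · rintro ⟨j, hj⟩; simpa using hj
  | cons c rest ih =>
      simp only [scanTrie, Bool.or_eq_true, ih]
      constructor
      · rintro (h | ⟨j, hj⟩)
        · exact ⟨0, by simpa using h⟩
        · exact ⟨j + 1, by simpa using hj⟩
      · rintro ⟨j, hj⟩
        cases j with
        | zero => exact Or.inl (by simpa using hj)
        | succ j => exact Or.inr ⟨j, by simpa using hj⟩

-- per-hint core: keyword-major substring search = trie scan over all start positions
lemma any_isIn_eq_scanTrie (low : String) :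
    printerKeywords.any (fun k => PySem.Str.isIn k low) = scanTrie low.toList := by
  apply Bool.eq_iff_iff.mpr
  rw [scanTrie_iff]
  simp only [List.any_eq_true]
  constructor
  · rintro ⟨k, hk, hin⟩
    have hinf : k.toList <:+: low.toList := (PySem.Str.isIn_iff_infix k low).mp hin
    have hisin : PySem.Chars.isIn k.toList low.toList = true :=
      (PySem.Chars.isIn_iff_infix _ _).mpr hinf
    obtain ⟨j, hj⟩ := (PySem.Chars.exists_prefix_drop_iff_isIn k.toList low.toList).mpr hisin
    exact ⟨j, by rw [walk_buildTrie]; exact List.any_eq_true.mpr ⟨k, hk, by simpa using hj⟩⟩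
  · rintro ⟨j, hj⟩
    rw [walk_buildTrie] at hj
    obtain ⟨k, hk, hp⟩ := List.any_eq_true.mp hj
    refine ⟨k, hk, ?_⟩
    rw [PySem.Str.isIn_iff_infix, ← PySem.Chars.isIn_iff_infix]
    exact (PySem.Chars.exists_prefix_drop_iff_isIn _ _).mp ⟨j, by simpa using hp⟩

-- ===== VERDICT (by name: the statement is the Claim_ definition above) =====
theorem is_printer_spec : Claim_equal_is_printer := by
  intro ports_open hints _
  unfold Spec_is_printer is_printer is_printer_alt
  have hguard :
      ((PySem.Dict.mk ports_open).getD (9100 : Int) false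
        || (PySem.Dict.mk ports_open).getD (631 : Int) false
        || (PySem.Dict.mk ports_open).getD (515 : Int) false)
      = [(9100 : Int), 631, 515].any (fun p => (PySem.Dict.mk ports_open).getD p false) := by
    simp [List.any, Bool.or_assoc]
  rw [hguard]
  split
  · rfl
  · exact congrArg hints.any (funext fun h => any_isIn_eq_scanTrie (PySem.Str.lower h))
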